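-- pv_equiv track=rewrite | github.com/ponyonKita/algorithmpractice | main/day_20161219/interestingParty.py | bestInvitation
-- ===== SOURCE A (Python) =====
-- def bestInvitation(first, second):
--     result = 1
--     countList = []
--     allList = first + second
--     for index in range(len(allList)):
--         count = allList.count(allList[index])
--         countList.append(count)
--         result = max(countList)
--
--     return result
-- ===== SOURCE B (Python) =====
-- def bestInvitation(first, second):
--     def go(xs):
--         if not xs:
--             return 1
--         rest = [x for x in xs if x != xs[0]]
--         return max(len(xs) - len(rest), go(rest))
--     return go(first + second)
-- ===== Notes on version B (the rewrite author's own statement) =====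
-- stated objective: alternative
-- what changed: Replaces the loop that re-counts every position with list.count and re-maximises a growing count list by a recursion that removes all occurrences of the first element each step, reading its multiplicity off the length difference and taking the max with the recursive result on the remainder.
import Mathlib
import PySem

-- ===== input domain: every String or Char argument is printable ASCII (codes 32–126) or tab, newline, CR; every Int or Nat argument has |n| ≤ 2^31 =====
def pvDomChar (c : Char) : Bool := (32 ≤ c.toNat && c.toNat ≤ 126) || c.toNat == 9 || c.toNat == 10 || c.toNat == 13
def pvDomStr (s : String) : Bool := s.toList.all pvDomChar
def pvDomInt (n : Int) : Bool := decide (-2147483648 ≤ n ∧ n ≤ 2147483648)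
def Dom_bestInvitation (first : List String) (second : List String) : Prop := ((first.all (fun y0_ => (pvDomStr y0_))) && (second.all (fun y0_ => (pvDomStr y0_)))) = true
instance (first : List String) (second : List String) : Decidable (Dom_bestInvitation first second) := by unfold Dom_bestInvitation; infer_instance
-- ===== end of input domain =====

-- B replaces A's re-count-and-re-maximise loop by a recursion that strips all occurrences
-- of the first element each step (its count read off the length difference); return values
-- proved equal (alternative decomposition, no speed claim).

-- ===== PORT A =====
-- literal port: for index in range(len(allList)): count = allList.count(allList[index]);
-- countList.append(count); result = max(countList)   (countList is nonempty whenever max is taken,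
-- so the .getD 1 default of max? is never used by Python's max)
def bestInvitation (first : List String) (second : List String) : Int :=
  let allList := first ++ second
  let st := (PySem.List.pyRange 0 (PySem.List.len allList) 1).foldl
    (fun (st : List Int × Int) index =>
      let count : Int := (PySem.List.count allList (PySem.List.pyGetD allList index "") : Int)
      let countList := st.1 ++ [count]
      (countList, (PySem.List.max? countList (fun y => y)).getD 1))
    ([], 1)
  st.2

-- ===== PORT B =====
-- literal port of Source B's helper go: empty -> 1; else filter out all copies of xs[0],
-- answer = max(len xs - len rest, go rest)
def pvGo (xs : List String) : Int :=
  match xs with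
  | [] => 1
  | h :: t =>
    let rest := (h :: t).filter (fun x => x != h)
    max (PySem.List.len (h :: t) - PySem.List.len rest) (pvGo rest)
termination_by xs.length
decreasing_by
  simp only [List.filter_cons, bne_self_eq_false, List.length_cons]
  exact Nat.lt_succ_of_le (List.length_filter_le _ _)

def bestInvitation_alt (first : List String) (second : List String) : Int :=
  pvGo (first ++ second)

-- ===== PRECONDITION & SPEC =====
def Spec_bestInvitation (first : List String) (second : List String) (out : Int) : Prop := out = bestInvitation_alt first second
instance (first : List String) (second : List String) (out : Int) : Decidable (Spec_bestInvitation first second out) := by unfold Spec_bestInvitation; infer_instance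

-- ===== CLAIM (what is proved, stated in full; the proofs are below) =====
def Claim_equal_bestInvitation : Prop := ∀ (first : List String) (second : List String), Dom_bestInvitation first second → Spec_bestInvitation first second (bestInvitation first second)

-- ===== LEMMAS AND PROOFS =====

-- A's loop invariant: folding the remaining elements extends countList by their counts and
-- keeps result = max of countList (with default 1 on the empty list).
theorem pv_foldA (l : List String) (p : List String) (cl : List Int) :
    p.foldl
      (fun (st : List Int × Int) x =>
        let count : Int := (PySem.List.count l x : Int)
        let countList := st.1 ++ [count]
        (countList, (PySem.List.max? countList (fun y => y)).getD 1))
      (cl, (PySem.List.max? cl (fun y => y)).getD 1)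
    = (cl ++ p.map (fun x => (PySem.List.count l x : Int)),
       (PySem.List.max? (cl ++ p.map (fun x => (PySem.List.count l x : Int))) (fun y => y)).getD 1) := by
  induction p generalizing cl with
  | nil => simp
  | cons x t ih =>
    simp only [List.foldl_cons, List.map_cons]
    rw [ih (cl ++ [(PySem.List.count l x : Int)])]
    simp

-- Python's max (with default 1) of a list equals any member that is an upper bound.
theorem pv_max_char (xs : List Int) (m : Int) (hm : m ∈ xs) (hub : ∀ z ∈ xs, z ≤ m) :
    (PySem.List.max? xs (fun y => y)).getD 1 = m := by
  rcases hxs : PySem.List.max? xs (fun y => y) with _ | m'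
  · have hx : xs = [] := (PySem.List.max?_eq_none_iff xs _).1 hxs
    simp [hx] at hm
  · have h1 : m' ≤ m := hub m' (PySem.List.max?_mem hxs)
    have h2 : m ≤ m' := PySem.List.max?_isMax hxs m hm
    simp [le_antisymm h1 h2]

-- count of the head = length removed by filtering it out (as Int)
theorem pv_count_len (h : String) (l : List String) :
    (l.count h : Int) = (l.length : Int) - ((l.filter (fun x => x != h)).length : Int) := by
  induction l with
  | nil => simp
  | cons a t ih =>
    by_cases hah : a = h
    · subst hah
      simp only [List.count_cons_self, List.filter_cons, bne_self_eq_false, List.length_cons]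
      push_cast
      omega
    · have hbne : (a != h) = true := by simp [bne, hah]
      rw [List.count_cons_of_ne hah, List.filter_cons, if_pos hbne]
      simp only [List.length_cons]
      push_cast at ih ⊢
      omega

-- go computes Python's max-with-default-1 of the counts of all elements.
theorem pv_go (n : Nat) : ∀ (l : List String), l.length ≤ n →
    pvGo l = (PySem.List.max? (l.map (fun x => (PySem.List.count l x : Int))) (fun y => y)).getD 1 := by
  induction n with
  | zero =>
    intro l hl
    have : l = [] := List.length_eq_zero_iff.1 (Nat.le_zero.1 hl)
    subst this
    simp [pvGo, PySem.List.max?]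
  | succ n ih =>
    intro l hl
    cases l with
    | nil => simp [pvGo, PySem.List.max?]
    | cons h t =>
      have hfl : (h :: t).filter (fun x => x != h) = t.filter (fun x => x != h) := by
        simp
      rw [pvGo]
      simp only [hfl, PySem.List.len_eq, PySem.List.count_eq]
      set rest := t.filter (fun x => x != h) with hrest
      have hrlen : rest.length ≤ n := by
        rw [hrest]
        have h1 := List.length_filter_le (fun x => x != h) t
        simp only [List.length_cons] at hl
        omega
      have hIH := ih rest hrlen
      simp only [PySem.List.count_eq] at hIH
      rw [hIH]
      have hmemrest : ∀ x ∈ rest, x ≠ h ∧ x ∈ h :: t := by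
        intro x hx
        rw [hrest] at hx
        rcases List.mem_filter.1 hx with ⟨hx1, hx2⟩
        exact ⟨by simpa [bne] using hx2, List.mem_cons_of_mem _ hx1⟩
      have hcnt : ∀ x ∈ rest, List.count x (h :: t) = List.count x rest := by
        intro x hx
        have hxne : (x != h) = true := by
          simp only [bne_iff_ne, ne_eq]
          exact (hmemrest x hx).1
        rw [← hfl]
        exact (List.count_filter (p := fun y => y != h) (a := x) (l := h :: t) hxne).symm
      have hch : (List.count h (h :: t) : Int) = ((h :: t).length : Int) - (rest.length : Int) := by
        have := pv_count_len h (h :: t)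
        rwa [hfl] at this
      rw [← hch]
      symm
      apply pv_max_char
      · -- membership of the max of the two candidates
        rcases max_choice ((List.count h (h :: t) : Int))
            ((PySem.List.max? (rest.map (fun x => (List.count x rest : Int))) (fun y => y)).getD 1)
            with hmx | hmx <;> rw [hmx]
        · exact List.mem_map.2 ⟨h, by simp, rfl⟩
        · rcases hre : PySem.List.max? (rest.map (fun x => (List.count x rest : Int)))
              (fun y => y) with _ | m
          · -- rest is empty: the default 1 was picked, and then count h = 1
            have hle1 : (List.count h (h :: t) : Int) ≤ 1 := by
              have hmll := le_max_left ((List.count h (h :: t) : Int))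
                ((PySem.List.max? (rest.map (fun x => (List.count x rest : Int))) (fun y => y)).getD 1)
              rw [hmx, hre] at hmll
              simpa using hmll
            have hge1 : (1 : Int) ≤ (List.count h (h :: t) : Int) := by
              have : 0 < (h :: t).count h := List.count_pos_iff.2 (List.mem_cons_self)
              omega
            simp only [Option.getD_none]
            have h1 : (1 : Int) = ((List.count h (h :: t) : Int)) := by omega
            rw [h1]
            exact List.mem_map.2 ⟨h, by simp, rfl⟩
          · have hmem := PySem.List.max?_mem hre
            rcases List.mem_map.1 hmem with ⟨x, hx, hxm⟩
            simp only [Option.getD_some]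
            rw [← hxm]
            refine List.mem_map.2 ⟨x, (hmemrest x hx).2, ?_⟩
            rw [hcnt x hx]
      · -- upper bound over all counts of elements of h :: t
        intro z hz
        rcases List.mem_map.1 hz with ⟨x, hx, rfl⟩
        by_cases hxh : x = h
        · subst hxh
          exact le_max_left _ _
        · have hxr : x ∈ rest := by
            rw [hrest]
            refine List.mem_filter.2 ⟨?_, by simp [bne, hxh]⟩
            rcases List.mem_cons.1 hx with hx1 | hx1
            · exact absurd hx1 hxh
            · exact hx1
          have hmem : (List.count x (h :: t) : Int)
              ∈ rest.map (fun y => (List.count y rest : Int)) := by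
            refine List.mem_map.2 ⟨x, hxr, ?_⟩
            rw [hcnt x hxr]
          rcases hre : PySem.List.max? (rest.map (fun y => (List.count y rest : Int)))
              (fun y => y) with _ | m
          · have hnil := (PySem.List.max?_eq_none_iff _ _).1 hre
            rw [hnil] at hmem
            simp at hmem
          · have hle : (List.count x (h :: t) : Int) ≤ m :=
              PySem.List.max?_isMax hre _ hmem
            simp only [Option.getD_some]
            exact le_trans hle (le_max_right _ _)

theorem pv_main (first second : List String) :
    bestInvitation first second = bestInvitation_alt first second := by
  unfold bestInvitation bestInvitation_alt
  simp only
  set l := first ++ second with hl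
  rw [PySem.List.foldl_pyRange_zero_pyGetD l ""
        (fun (st : List Int × Int) x =>
          let count : Int := (PySem.List.count l x : Int)
          let countList := st.1 ++ [count]
          (countList, (PySem.List.max? countList (fun y => y)).getD 1))
        ([], 1)]
  have hA := pv_foldA l l []
  simp only [List.nil_append, PySem.List.max?, List.foldl_nil, Option.getD_none] at hA ⊢
  rw [hA]
  exact (pv_go l.length l le_rfl).symm

-- ===== VERDICT (by name: the statement is the Claim_ definition above) =====
theorem bestInvitation_spec : Claim_equal_bestInvitation := by
  intro first second _
  exact pv_main first second
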